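-- pv_equiv track=rewrite | github.com/ugSUBMARINE/af3jobs | af3jobs/components.py | _generate_msa_str
-- ===== SOURCE A (Python) =====
-- def _generate_msa_str(msa: str, name: str) -> list[str]:
--     """Generate a list of strings for the MSA output"""
--     msa_lines = msa.splitlines()
--     num_lines = len(msa_lines)
--     lines = []
--     if num_lines == 0:
--         lines.append(f"   {name}: empty string")
--     elif num_lines <= 8:
--         lines.append(f"   {name}: {num_lines} lines.")
--         lines.extend(f"      {line[:60]}" for line in msa_lines)
--     else:
--         lines.append(f"   {name}: {len(msa_lines)} lines.")
--         lines.extend(f"      {line[:60]}" for line in msa_lines[:4])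
--         lines.append("      ...")
--         lines.extend(f"      {line[:60]}" for line in msa_lines[-4:])
--     return lines
-- ===== SOURCE B (Python) =====
-- def _generate_msa_str(msa: str, name: str) -> list[str]:
--     """Generate a list of strings for the MSA output"""
--     msa_lines = msa.splitlines()
--     n = len(msa_lines)
--     if n == 0:
--         return [f"   {name}: empty string"]
--     out = [f"   {name}: {n} lines."]
--     prev = -1
--     for i in range(n):
--         if i < 4 or i >= n - 4:
--             if i != prev + 1:
--                 out.append("      ...")
--             out.append(f"      {msa_lines[i][:60]}")
--             prev = i
--     return out
-- ===== Notes on version B (the rewrite author's own statement) =====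
-- stated objective: alternative
-- what changed: B replaces A's three-way branch on the line count (<=8 vs >8) and slice concatenation with a single index pass that shows exactly the indices i<4 or i>=n-4 and inserts the ellipsis wherever the shown indices jump, so the 8-line boundary and the ellipsis fall out of the gap test instead of being special-cased.
import Mathlib
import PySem

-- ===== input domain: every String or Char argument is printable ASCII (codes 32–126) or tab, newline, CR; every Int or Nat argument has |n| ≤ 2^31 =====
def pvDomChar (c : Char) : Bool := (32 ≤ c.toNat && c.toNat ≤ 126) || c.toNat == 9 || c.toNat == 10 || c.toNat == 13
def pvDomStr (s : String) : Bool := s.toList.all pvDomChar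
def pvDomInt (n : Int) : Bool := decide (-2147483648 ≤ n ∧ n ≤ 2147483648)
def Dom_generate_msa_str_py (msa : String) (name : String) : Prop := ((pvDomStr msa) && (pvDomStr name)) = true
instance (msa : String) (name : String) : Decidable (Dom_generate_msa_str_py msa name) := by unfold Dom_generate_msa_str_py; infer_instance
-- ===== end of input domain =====

-- B changes the decomposition (one index pass with a gap test instead of A's <=8/ >8 branch and
-- slice concatenation); same output, same cost.

-- shared f-string helpers: `f"      {line[:60]}"` and the header `f"   {name}: {n} lines."`
def pvFmt (line : String) : String := "      " ++ PySem.Str.slice line none (some 60)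
def pvHdr (name : String) (n : Int) : String := "   " ++ name ++ ": " ++ PySem.Int.toStr n ++ " lines."

-- ===== PORT A =====
def generate_msa_str_py (msa : String) (name : String) : List String :=
  let msa_lines := PySem.Str.splitlines msa
  let num_lines : Int := (msa_lines.length : Int)
  let lines : List String := []
  if num_lines = 0 then
    lines ++ ["   " ++ name ++ ": empty string"]
  else if num_lines ≤ 8 then
    (lines ++ [pvHdr name num_lines]) ++ msa_lines.map pvFmt
  else
    ((lines ++ [pvHdr name num_lines])
        ++ (PySem.List.slice msa_lines none (some 4)).map pvFmt)
      ++ ["      ..."]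
      ++ (PySem.List.slice msa_lines (some (-4)) none).map pvFmt

-- ===== PORT B =====
-- the body of B's for-loop (state = (out, prev))
def pvAltStep (L : List String) (n : Int) (s : List String × Int) (i : Int) : List String × Int :=
  if i < 4 ∨ n - 4 ≤ i then
    ((if i ≠ s.2 + 1 then s.1 ++ ["      ..."] else s.1)
       ++ [pvFmt (PySem.List.pyGetD L i "")], i)
  else s

def generate_msa_str_py_alt (msa : String) (name : String) : List String :=
  let msa_lines := PySem.Str.splitlines msa
  let n : Int := (msa_lines.length : Int)
  if n = 0 then
    ["   " ++ name ++ ": empty string"]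
  else
    ((PySem.List.pyRange 0 n 1).foldl (pvAltStep msa_lines n) ([pvHdr name n], -1)).1

-- ===== PRECONDITION & SPEC =====
def Spec_generate_msa_str_py (msa : String) (name : String) (out : List String) : Prop := out = generate_msa_str_py_alt msa name
instance (msa : String) (name : String) (out : List String) : Decidable (Spec_generate_msa_str_py msa name out) := by unfold Spec_generate_msa_str_py; infer_instance

-- ===== CLAIM (what is proved, stated in full; the proofs are below) =====
def Claim_equal_generate_msa_str_py : Prop := ∀ (msa : String) (name : String), Dom_generate_msa_str_py msa name → Spec_generate_msa_str_py msa name (generate_msa_str_py msa name)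

-- ===== LEMMAS AND PROOFS =====

-- a run of consecutive shown indices appends its formatted lines and never the ellipsis
theorem pvConsec (L : List String) (n : Int) :
    ∀ (m : Nat) (a b : Int) (acc : List String), b = a + m → 0 ≤ a → a.toNat + m ≤ L.length →
      (∀ i : Int, a ≤ i → i < b → (i < 4 ∨ n - 4 ≤ i)) →
      (PySem.List.pyRange a b 1).foldl (pvAltStep L n) (acc, a - 1)
        = (acc ++ ((L.drop a.toNat).take m).map pvFmt, b - 1) := by
  intro m
  induction m with
  | zero =>
      intro a b acc hb ha hlen _
      subst hb
      rw [PySem.List.pyRange_one_eq_nil (by omega)]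
      simp
  | succ m ih =>
      intro a b acc hb ha hlen hcond
      subst hb
      rw [PySem.List.pyRange_one_cons (by omega)]
      have hstep : pvAltStep L n (acc, a - 1) a
          = (acc ++ [pvFmt (PySem.List.pyGetD L a "")], a) := by
        unfold pvAltStep
        rw [if_pos (hcond a le_rfl (by omega))]
        simp
      rw [List.foldl_cons, hstep]
      have hc : ((m + 1 : Nat) : Int) = 1 + (m : Int) := by push_cast; ring
      rw [hc, ← add_assoc]
      have hpair : (acc ++ [pvFmt (PySem.List.pyGetD L a "")], a)
          = (acc ++ [pvFmt (PySem.List.pyGetD L a "")], (a + 1) - 1) := by norm_num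
      rw [hpair, ih (a + 1) (a + 1 + (m : Int)) _ rfl (by omega) (by omega)
            (fun i h1 h2 => hcond i (by omega) (by omega))]
      have haN : a.toNat < L.length := by omega
      have ha2 : (0 : Int) ≤ a := ha
      have hlt : a < (L.length : Int) := by omega
      have hget : PySem.List.pyGetD L a "" = L[a.toNat] :=
        PySem.List.pyGetD_eq_getElem L "" ha2 hlt
      have hdrop : L.drop a.toNat = L[a.toNat] :: L.drop (a.toNat + 1) :=
        (List.getElem_cons_drop (as := L) haN).symm
      have htn : (a + 1).toNat = a.toNat + 1 := by omega
      have hlist : List.take (m + 1) (List.drop a.toNat L)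
          = L[a.toNat] :: List.take m (List.drop (a.toNat + 1) L) := by
        rw [hdrop, List.take_succ_cons]
      rw [hget, htn, hlist]
      simp

-- indices the filter hides leave the state unchanged
theorem pvSkip (L : List String) (n : Int) :
    ∀ (l : List Int) (s : List String × Int), (∀ i ∈ l, ¬ (i < 4 ∨ n - 4 ≤ i)) →
      l.foldl (pvAltStep L n) s = s := by
  intro l
  induction l with
  | nil => intro s _; rfl
  | cons x xs ih =>
      intro s h
      rw [List.foldl_cons]
      have : pvAltStep L n s x = s := by
        unfold pvAltStep
        rw [if_neg (h x (List.mem_cons_self))]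
      rw [this, ih _ (fun i hi => h i (List.mem_cons_of_mem _ hi))]

-- the core equality over the split line list
theorem pvCore (L : List String) (name : String) (h0 : L ≠ []) :
    ((PySem.List.pyRange 0 (L.length : Int) 1).foldl
        (pvAltStep L (L.length : Int)) ([pvHdr name (L.length : Int)], -1)).1
      = if (L.length : Int) ≤ 8 then [pvHdr name (L.length : Int)] ++ L.map pvFmt
        else (([pvHdr name (L.length : Int)]
                ++ (PySem.List.slice L none (some 4)).map pvFmt)
              ++ ["      ..."])
              ++ (PySem.List.slice L (some (-4)) none).map pvFmt := by
  have hn : 0 < L.length := List.length_pos_iff.mpr h0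
  by_cases h8 : (L.length : Int) ≤ 8
  · rw [if_pos h8]
    have := pvConsec L (L.length : Int) L.length 0 (L.length : Int)
      [pvHdr name (L.length : Int)] (by ring) le_rfl (by omega)
      (fun i h1 h2 => by omega)
    norm_num at this
    rw [this]
    simp
  · rw [if_neg h8]
    have h9 : 8 < L.length := by omega
    have hsplit : PySem.List.pyRange 0 (L.length : Int) 1
        = (PySem.List.pyRange 0 4 1 ++ PySem.List.pyRange 4 ((L.length : Int) - 4) 1)
            ++ PySem.List.pyRange ((L.length : Int) - 4) (L.length : Int) 1 := by
      rw [PySem.List.pyRange_one_append 0 ((L.length : Int) - 4) (L.length : Int) (by omega) (by omega),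
          PySem.List.pyRange_one_append 0 4 ((L.length : Int) - 4) (by omega) (by omega)]
    rw [hsplit, List.foldl_append, List.foldl_append]
    have h1 := pvConsec L (L.length : Int) 4 0 4 [pvHdr name (L.length : Int)]
      (by norm_num) le_rfl (by omega) (fun i hi1 hi2 => Or.inl hi2)
    norm_num at h1
    rw [h1]
    rw [pvSkip L (L.length : Int) (PySem.List.pyRange 4 ((L.length : Int) - 4) 1) _ (fun i hi => by
      rw [PySem.List.mem_pyRange_one] at hi; omega)]
    rw [PySem.List.pyRange_one_cons (show (L.length : Int) - 4 < (L.length : Int) by omega),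
        List.foldl_cons]
    have hstep : pvAltStep L (L.length : Int)
        (pvHdr name (L.length : Int) :: List.take 4 (List.map pvFmt L), 3) ((L.length : Int) - 4)
        = (((pvHdr name (L.length : Int) :: List.take 4 (List.map pvFmt L)) ++ ["      ..."])
             ++ [pvFmt (PySem.List.pyGetD L ((L.length : Int) - 4) "")], (L.length : Int) - 4) := by
      unfold pvAltStep
      rw [if_pos (Or.inr (by omega))]
      rw [if_pos (show ((L.length : Int) - 4 ≠ 3 + 1) by omega)]
    rw [hstep]
    have h2 := pvConsec L (L.length : Int) 3 ((L.length : Int) - 3) (L.length : Int)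
      (((pvHdr name (L.length : Int) :: List.take 4 (List.map pvFmt L)) ++ ["      ..."])
         ++ [pvFmt (PySem.List.pyGetD L ((L.length : Int) - 4) "")])
      (by push_cast; ring) (by omega) (by omega) (fun i hi1 hi2 => Or.inr (by omega))
    have hprev : ((L.length : Int) - 4) = ((L.length : Int) - 3) - 1 := by ring
    rw [show ((L.length : Int) - 4 + 1) = (L.length : Int) - 3 by ring]
    rw [← hprev] at h2
    rw [h2]
    -- now identify the pieces with A's slices
    have hsl1 : PySem.List.slice L none (some (4 : Int)) = L.take 4 := by
      rw [PySem.List.slice_to]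
      · rfl
      · norm_num
    have hsl2 : PySem.List.slice L (some (-4 : Int)) none = L.drop (L.length - 4) :=
      PySem.List.slice_from_neg_ofNat L 4 (by norm_num)
    have hm4 : ((L.length : Int) - 4).toNat = L.length - 4 := by omega
    have hm3 : ((L.length : Int) - 3).toNat = L.length - 3 := by omega
    have hlt4 : L.length - 4 < L.length := by omega
    have hget : PySem.List.pyGetD L ((L.length : Int) - 4) "" = L[L.length - 4]'hlt4 := by
      have h := PySem.List.pyGetD_eq_getElem L ""
        (show (0 : Int) ≤ (L.length : Int) - 4 by omega)
        (show (L.length : Int) - 4 < (L.length : Int) by omega)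
      simpa [hm4] using h
    have hdrop4 : L.drop (L.length - 4) = L[L.length - 4] :: L.drop (L.length - 3) := by
      have := (List.getElem_cons_drop (as := L) hlt4).symm
      rwa [show L.length - 4 + 1 = L.length - 3 by omega] at this
    have htake3 : List.take 3 (List.drop (L.length - 3) L) = List.drop (L.length - 3) L := by
      apply List.take_of_length_le
      rw [List.length_drop]; omega
    rw [hsl1, hsl2, hget, hm3, htake3, hdrop4]
    simp

-- ===== VERDICT (by name: the statement is the Claim_ definition above) =====
theorem generate_msa_str_py_spec : Claim_equal_generate_msa_str_py := by
  intro msa name _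
  unfold Spec_generate_msa_str_py generate_msa_str_py generate_msa_str_py_alt
  by_cases h0 : PySem.Str.splitlines msa = []
  · simp [h0]
  · have hn : ((PySem.Str.splitlines msa).length : Int) ≠ 0 := by
      have := List.length_pos_iff.mpr h0
      omega
    simp only []
    rw [if_neg hn, if_neg hn, pvCore _ name h0]
    simp
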